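-- pv_equiv track=rewrite | github.com/kurniawanen/fuzzy_genetic_algorithm | main.py | repair_chromosome
-- ===== SOURCE A (Python) =====
-- def repair_chromosome(chromosome, weight, capacity):
--     total_weight = 0
--     for i in range(len(chromosome)):
--         total_weight += chromosome[i] * weight[i]
--
--     item = sorted(zip(weight, [x for x in range(len(weight))]))
--     temp = chromosome
--     now = 0
--     while total_weight > capacity:
--         temp[item[now][1]] = 0
--         total_weight -= item[now][0]
--         now = now + 1
--     return temp
-- ===== SOURCE B (Python) =====
-- def repair_chromosome(chromosome, weight, capacity):
--     # Return-value equivalent to A; like A it mutates chromosome in place.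
--     # Selection by repeated linear min-scan: no sort, no precomputed order.
--     total = sum(c * w for c, w in zip(chromosome, weight))
--     remaining = [(w, i) for i, w in enumerate(weight)]
--     while total > capacity:
--         pos = 0
--         for p in range(1, len(remaining)):
--             if remaining[p] < remaining[pos]:
--                 pos = p
--         w, i = remaining.pop(pos)
--         chromosome[i] = 0
--         total -= w
--     return chromosome
-- ===== Notes on version B (the rewrite author's own statement) =====
-- stated objective: alternative
-- what changed: A pre-sorts all (weight,index) pairs and walks the sorted list while zeroing; B never sorts: it keeps a shrinking pool of (weight,index) pairs and on each repair iteration finds the current minimum by a linear scan and pops it (selection instead of sorting).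
-- outside the precondition, e.g. on repair_chromosome([1], [1, 5], 0): A returns [0], B returns [0]
import Mathlib
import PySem

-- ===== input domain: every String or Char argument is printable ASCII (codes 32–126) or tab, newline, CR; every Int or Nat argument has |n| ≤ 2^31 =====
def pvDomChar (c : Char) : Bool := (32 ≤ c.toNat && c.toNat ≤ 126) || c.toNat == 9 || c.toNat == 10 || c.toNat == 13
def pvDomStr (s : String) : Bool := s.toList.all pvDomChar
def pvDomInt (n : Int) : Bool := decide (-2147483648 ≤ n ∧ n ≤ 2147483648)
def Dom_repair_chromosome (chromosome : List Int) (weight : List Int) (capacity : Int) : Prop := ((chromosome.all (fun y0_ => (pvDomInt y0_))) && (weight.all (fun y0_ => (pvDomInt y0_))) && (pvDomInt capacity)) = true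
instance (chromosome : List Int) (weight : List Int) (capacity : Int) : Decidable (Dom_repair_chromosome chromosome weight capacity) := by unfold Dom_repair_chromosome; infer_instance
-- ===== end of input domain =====

-- B replaces A's full sort of the (weight, index) pairs by selection: a shrinking pool from which
-- each loop iteration extracts the current minimum by a linear scan; return-value equivalence —
-- both Pythons mutate `chromosome` in place.

-- ===== PORT A =====
-- while total_weight > capacity: temp[item[now][1]] = 0; total_weight -= item[now][0]; now += 1
-- (structural recursion on the remaining sorted items; Python raises IndexError on exhaustion,
--  which Pre_ excludes)
def pvLoopA (capacity : Int) (items : List (Int × Int)) (tw : Int) (temp : List Int) : List Int :=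
  if tw ≤ capacity then temp else
    match items with
    | [] => temp
    | (w, i) :: rest => pvLoopA capacity rest (tw - w) (PySem.List.pySetD temp i 0)

def repair_chromosome (chromosome : List Int) (weight : List Int) (capacity : Int) : List Int :=
  let total_weight : Int :=
    (PySem.List.pyRange 0 (chromosome.length : Int) 1).foldl
      (fun tw i => tw + PySem.List.pyGetD chromosome i 0 * PySem.List.pyGetD weight i 0) 0
  let item := PySem.List.sorted2
      (weight.zip ((PySem.List.pyRange 0 (weight.length : Int) 1).map (fun x => x)))
      Prod.fst Prod.snd false
  pvLoopA capacity item total_weight chromosome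

-- ===== PORT B =====
-- Python tuple comparison (w1,i1) < (w2,i2)
def pvLexLtB (a b : Int × Int) : Bool := a.1 < b.1 || (a.1 == b.1 && a.2 < b.2)

-- pos = 0; for p in range(1, len(remaining)): if remaining[p] < remaining[pos]: pos = p
def pvSelPos (xs : List (Int × Int)) : Int :=
  (PySem.List.pyRange 1 (xs.length : Int) 1).foldl
    (fun pos p =>
      if pvLexLtB (PySem.List.pyGetD xs p (0, 0)) (PySem.List.pyGetD xs pos (0, 0)) then p else pos)
    0

-- while total > capacity: (linear min scan); w, i = remaining.pop(pos); chromosome[i] = 0; total -= w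
-- (pop on an empty pool is Python's IndexError, excluded by Pre_; the port returns ch there)
def pvLoopB (cap : Int) (xs : List (Int × Int)) (tw : Int) (ch : List Int) : List Int :=
  if tw ≤ cap then ch else
    match h : PySem.List.pop? xs (pvSelPos xs) with
    | none => ch
    | some (wi, rest) => pvLoopB cap rest (tw - wi.1) (PySem.List.pySetD ch wi.2 0)
termination_by xs.length
decreasing_by
  have := PySem.List.length_of_pop?_eq_some xs h
  simp at this
  omega

def repair_chromosome_alt (chromosome : List Int) (weight : List Int) (capacity : Int) : List Int :=
  let total : Int := (chromosome.zip weight).foldl (fun acc p => acc + p.1 * p.2) 0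
  let remaining := (PySem.List.enumerate weight 0).map (fun p => (p.2, p.1))
  pvLoopB capacity remaining total chromosome

-- ===== PRECONDITION & SPEC =====
-- dot product used by Pre_ (a closed-form arithmetic condition on the inputs only)
def pvDot (chromosome weight : List Int) : Int :=
  (chromosome.zip weight).foldl (fun acc p => acc + p.1 * p.2) 0

-- Pre_ excludes exactly the inputs where A raises an IndexError, plus the inputs where weight is
-- strictly longer than chromosome AND the repair loop runs (there A may return only by accident of
-- which sorted indices get popped before the loop exits, and can index past chromosome's end).
def Pre_repair_chromosome (chromosome : List Int) (weight : List Int) (capacity : Int) : Prop :=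
  (chromosome.length ≤ weight.length ∧ pvDot chromosome weight ≤ capacity) ∨
  (chromosome.length = weight.length ∧ pvDot chromosome weight - weight.sum ≤ capacity)
instance (chromosome : List Int) (weight : List Int) (capacity : Int) : Decidable (Pre_repair_chromosome chromosome weight capacity) := by unfold Pre_repair_chromosome; infer_instance

def pvWitness_repair_chromosome : List Int × List Int × Int := ([1, 1, 0], [2, 3, 4], 4)

def Spec_repair_chromosome (chromosome : List Int) (weight : List Int) (capacity : Int) (out : List Int) : Prop := out = repair_chromosome_alt chromosome weight capacity
instance (chromosome : List Int) (weight : List Int) (capacity : Int) (out : List Int) : Decidable (Spec_repair_chromosome chromosome weight capacity out) := by unfold Spec_repair_chromosome; infer_instance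

-- ===== CLAIM (what is proved, stated in full; the proofs are below) =====
def Claim_equal_repair_chromosome : Prop := ∀ (chromosome : List Int) (weight : List Int) (capacity : Int), Dom_repair_chromosome chromosome weight capacity → Pre_repair_chromosome chromosome weight capacity → Spec_repair_chromosome chromosome weight capacity (repair_chromosome chromosome weight capacity)

-- ===== LEMMAS AND PROOFS =====

lemma pv_total_eq (c w : List Int) (h : c.length ≤ w.length) :
    (PySem.List.pyRange 0 (c.length : Int) 1).foldl
      (fun tw i => tw + PySem.List.pyGetD c i 0 * PySem.List.pyGetD w i 0) 0
    = (c.zip w).foldl (fun acc p => acc + p.1 * p.2) 0 := by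
  have hlen : (c.zip w).length = c.length := by
    simp [List.length_zip]; omega
  have hmain := PySem.List.foldl_pyRange_zero_pyGetD' (c.zip w) ((0 : Int), (0 : Int))
      (fun acc p => acc + p.1 * p.2) 0
  rw [hlen] at hmain
  rw [← hmain]
  apply PySem.List.foldl_congr_mem
  intro acc i hi
  rw [PySem.List.mem_pyRange_one] at hi
  have hic : i.toNat < c.length := by omega
  have hiw : i.toNat < w.length := by omega
  have hiz : i.toNat < (c.zip w).length := by omega
  rw [PySem.List.pyGetD_eq_getElem c 0 hi.1 (by exact_mod_cast hi.2),
      PySem.List.pyGetD_eq_getElem w 0 hi.1 (by omega),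
      PySem.List.pyGetD_eq_getElem (c.zip w) ((0:Int),(0:Int)) hi.1 (by omega)]
  simp [List.getElem_zip]

lemma pv_order_eq (w : List Int) : ∀ (s : Int),
    (PySem.List.enumerate w s).map (fun p => (p.2, p.1))
    = w.zip ((PySem.List.pyRange s (s + w.length) 1).map (fun x => x)) := by
  induction w with
  | nil => intro s; simp [PySem.List.enumerate, PySem.List.pyRange_one_eq_nil]
  | cons x xs ih =>
    intro s
    have hnn : (0 : Int) ≤ (xs.length : Int) := Int.natCast_nonneg _
    have harg : s + ((x :: xs).length : Int) = (s + 1) + (xs.length : Int) := by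
      push_cast [List.length_cons]; ring
    rw [PySem.List.enumerate_cons, harg,
      PySem.List.pyRange_one_cons (by omega)]
    simp only [List.map_cons, List.zip_cons_cons]
    rw [ih (s + 1)]

-- sorted2 with keys (fst, snd) IS sorting by the lexicographic linear order on Int × Int
lemma pv_sorted2_eq_sorted_lex (xs : List (Int × Int)) :
    PySem.List.sorted2 xs Prod.fst Prod.snd false
    = PySem.List.sorted xs (fun p => toLex p) false := by
  simp only [PySem.List.sorted2, PySem.List.sorted]
  congr 1
  funext acc x
  congr 1
  funext a b
  show (decide (a.1 < b.1) || (!decide (b.1 < a.1) && decide (a.2 < b.2)))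
      = decide (toLex a < toLex b)
  rw [Bool.eq_iff_iff]
  simp only [Bool.or_eq_true, Bool.and_eq_true, Bool.not_eq_eq_eq_not, Bool.not_true,
    decide_eq_true_eq, decide_eq_false_iff_not, not_lt, Prod.Lex.toLex_lt_toLex]
  omega

lemma pvLexLtB_iff (a b : Int × Int) : pvLexLtB a b = true ↔ toLex a < toLex b := by
  simp [pvLexLtB, Prod.Lex.toLex_lt_toLex]

-- the selection scan returns the index of the lexicographic minimum (first occurrence)
lemma pv_scan_aux (xs : List (Int × Int)) :
    ∀ n : Nat, 1 ≤ n → n ≤ xs.length →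
    ∃ k : Nat,
      (PySem.List.pyRange 1 (n : Int) 1).foldl
        (fun pos p =>
          if pvLexLtB (PySem.List.pyGetD xs p (0, 0)) (PySem.List.pyGetD xs pos (0, 0)) then p else pos)
        0 = (k : Int)
      ∧ k < n
      ∧ ∀ j : Nat, j < n → toLex (xs.getD k (0, 0)) ≤ toLex (xs.getD j (0, 0)) := by
  intro n
  induction n with
  | zero => intro h; omega
  | succ m ih =>
    intro _ hle
    by_cases hm : 1 ≤ m
    · obtain ⟨k, hfold, hk, hmin⟩ := ih hm (by omega)
      have hstep : ((m : Nat) : Int) + 1 = ((m + 1 : Nat) : Int) := by push_cast; ring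
      rw [← hstep, PySem.List.pyRange_one_succ_right (by omega), List.foldl_append, hfold]
      simp only [List.foldl_cons, List.foldl_nil]
      by_cases hlt : pvLexLtB (PySem.List.pyGetD xs (m : Int) (0, 0))
          (PySem.List.pyGetD xs (k : Int) (0, 0)) = true
      · refine ⟨m, by rw [if_pos hlt], by omega, ?_⟩
        rw [pvLexLtB_iff] at hlt
        rw [PySem.List.pyGetD_natCast, PySem.List.pyGetD_natCast] at hlt
        intro j hj
        by_cases hjm : j = m
        · subst hjm; exact le_refl _
        · exact le_of_lt (lt_of_lt_of_le hlt (hmin j (by omega)))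
      · refine ⟨k, by rw [if_neg hlt], by omega, ?_⟩
        intro j hj
        by_cases hjm : j = m
        · subst hjm
          rw [pvLexLtB_iff, not_lt] at hlt
          rw [PySem.List.pyGetD_natCast, PySem.List.pyGetD_natCast] at hlt
          exact hlt
        · exact hmin j (by omega)
    · have hm0 : m = 0 := by omega
      subst hm0
      refine ⟨0, ?_, by omega, ?_⟩
      · rw [show ((1 : Nat) : Int) = 1 by norm_num, PySem.List.pyRange_one_eq_nil (by omega)]
        simp
      · intro j hj
        have : j = 0 := by omega
        subst this; exact le_refl _

lemma pvSelPos_spec (xs : List (Int × Int)) (hne : xs ≠ []) :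
    ∃ k : Nat, pvSelPos xs = (k : Int) ∧ k < xs.length ∧
      ∀ y ∈ xs, toLex (xs.getD k (0, 0)) ≤ toLex y := by
  have hlen : 1 ≤ xs.length := List.length_pos_iff.mpr hne
  obtain ⟨k, hfold, hk, hmin⟩ := pv_scan_aux xs xs.length hlen (le_refl _)
  refine ⟨k, hfold, hk, ?_⟩
  intro y hy
  obtain ⟨j, hj, rfl⟩ := List.mem_iff_getElem.mp hy
  have := hmin j hj
  rwa [List.getD_eq_getElem _ _ hj] at this

-- extracting the minimum and sorting the rest = sorting the whole pool
lemma pv_sorted_cons_min (xs : List (Int × Int)) (hnd : xs.Nodup) (k : Nat) (hk : k < xs.length)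
    (hmin : ∀ y ∈ xs, toLex xs[k] ≤ toLex y) :
    PySem.List.sorted xs (fun p => toLex p) false
    = xs[k] :: PySem.List.sorted (xs.eraseIdx k) (fun p => toLex p) false := by
  apply PySem.List.sorted_eq_of_perm_of_pairwise_lt
  · exact ((PySem.List.sorted_perm (xs.eraseIdx k) _ false).cons xs[k]).trans
      (List.getElem_cons_eraseIdx_perm hk)
  · rw [List.pairwise_cons]
    have hnotmem : xs[k] ∉ xs.eraseIdx k := by
      have := ((List.getElem_cons_eraseIdx_perm hk).nodup_iff).mpr hnd
      exact (List.nodup_cons.mp this).1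
    constructor
    · intro y hy
      rw [PySem.List.mem_sorted] at hy
      have hyx : y ∈ xs := (List.eraseIdx_sublist xs k).subset hy
      have hne : xs[k] ≠ y := fun he => hnotmem (he ▸ hy)
      exact lt_of_le_of_ne (hmin y hyx) (fun he => hne (toLex.injective he))
    · have hnd' : (PySem.List.sorted (xs.eraseIdx k) (fun p => toLex p) false).Nodup :=
        (PySem.List.sorted_perm (xs.eraseIdx k) _ false).nodup_iff.mpr (hnd.eraseIdx k)
      have hle := PySem.List.sorted_pairwise (xs.eraseIdx k) (fun p => toLex p)
      exact (hle.and hnd').imp (fun h =>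
        lt_of_le_of_ne h.1 (fun he => h.2 (toLex.injective he)))

-- selection-by-scan runs A's walk over the sorted pool
lemma pv_loopB_eq_loopA (cap : Int) : ∀ (n : Nat) (xs : List (Int × Int)), xs.length = n →
    xs.Nodup → ∀ (tw : Int) (ch : List Int),
    pvLoopB cap xs tw ch = pvLoopA cap (PySem.List.sorted xs (fun p => toLex p) false) tw ch := by
  intro n
  induction n with
  | zero =>
    intro xs hlen _ tw ch
    have hxs : xs = [] := List.length_eq_zero_iff.mp hlen
    subst hxs
    rw [pvLoopB]
    by_cases htw : tw ≤ cap
    · rw [if_pos htw, pvLoopA.eq_def, if_pos htw]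
    · have hs : PySem.List.sorted ([] : List (Int × Int)) (fun p => toLex p) false = [] := rfl
      rw [if_neg htw, hs, pvLoopA.eq_def, if_neg htw]
      split
      · rfl
      · rename_i wi rest hp
        simp [PySem.List.pop?] at hp
  | succ m ih =>
    intro xs hlen hnd tw ch
    rw [pvLoopB]
    by_cases htw : tw ≤ cap
    · rw [if_pos htw, pvLoopA.eq_def, if_pos htw]
    · rw [if_neg htw]
      have hne : xs ≠ [] := by intro h; subst h; simp at hlen
      obtain ⟨k, hpos, hk, hmin⟩ := pvSelPos_spec xs hne
      have hmin' : ∀ y ∈ xs, toLex xs[k] ≤ toLex y := by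
        intro y hy
        have := hmin y hy
        rwa [List.getD_eq_getElem _ _ hk] at this
      have hpop : PySem.List.pop? xs (pvSelPos xs) = some (xs[k], xs.eraseIdx k) := by
        rw [hpos]; exact PySem.List.pop?_natCast xs k hk
      rw [hpop]
      rw [pv_sorted_cons_min xs hnd k hk hmin', pvLoopA.eq_def, if_neg htw]
      exact ih (xs.eraseIdx k) (by rw [List.length_eraseIdx_of_lt hk]; omega)
        (hnd.eraseIdx k) (tw - xs[k].1) (PySem.List.pySetD ch xs[k].2 0)

theorem repair_chromosome_spec : Claim_equal_repair_chromosome := by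
  intro c w cap _ hpre
  unfold Spec_repair_chromosome repair_chromosome repair_chromosome_alt
  have hle : c.length ≤ w.length := by
    rcases hpre with ⟨h, _⟩ | ⟨h, _⟩ <;> omega
  have hzero : (0 : Int) + (w.length : Int) = (w.length : Int) := by ring
  have hord : (PySem.List.enumerate w 0).map (fun p => (p.2, p.1))
      = w.zip ((PySem.List.pyRange 0 (w.length : Int) 1).map (fun x => x)) := by
    rw [pv_order_eq w 0, hzero]
  -- the pool has pairwise-distinct indices, hence is Nodup
  have hnd : ((PySem.List.enumerate w 0).map (fun p => (p.2, p.1))).Nodup := by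
    have h1 := PySem.List.pairwise_lt_enumerate w 0
    have h2 : (((PySem.List.enumerate w 0)).map (fun p => (p.2, p.1))).Pairwise
        (fun a b => a.2 < b.2) := List.Pairwise.map _ (fun a b h => h) h1
    exact h2.imp (fun h he => by rw [he] at h; exact lt_irrefl _ h)
  rw [pv_total_eq c w hle, ← hord, pv_sorted2_eq_sorted_lex,
    ← pv_loopB_eq_loopA cap _ _ rfl hnd]

-- ===== VERDICT =====
-- (theorem repair_chromosome_spec above proves Claim_equal_repair_chromosome)
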